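-- pv_equiv track=rewrite | github.com/yuto-49/real-estate-agent | services/social_simulator.py | _income_breakdown
-- ===== SOURCE A (Python) =====
-- from typing import Any, cast
--
-- def _income_breakdown(
--
--     supportive: list[dict[str, Any]],
--     opposed: list[dict[str, Any]],
--     neutral: list[dict[str, Any]],
-- ) -> dict[str, dict[str, int]]:
--     """Show which income bands lean which direction."""
--     breakdown: dict[str, dict[str, int]] = {}
--     for group, label in [
--         (supportive, "supportive"),
--         (opposed, "opposed"),
--         (neutral, "neutral"),
--     ]:
--         for entry in group:
--             band = entry["income_band"]
--             breakdown.setdefault(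
--                 band,
--                 {"supportive": 0, "opposed": 0, "neutral": 0},
--             )
--             breakdown[band][label] += 1
--     return breakdown
-- ===== SOURCE B (Python) =====
-- def _income_breakdown(
--     supportive: list,
--     opposed: list,
--     neutral: list,
-- ) -> dict:
--     """Show which income bands lean which direction (tally-then-merge)."""
--     # Phase 1: one frequency table per direction.
--     tallies = []
--     for label, group in (
--         ("supportive", supportive),
--         ("opposed", opposed),
--         ("neutral", neutral),
--     ):
--         counts: dict = {}
--         for entry in group:
--             band = entry["income_band"]
--             counts[band] = counts.get(band, 0) + 1
--         tallies.append((label, counts))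
--     # Phase 2: band order = first appearance across the three tables.
--     order: list = []
--     for _, counts in tallies:
--         for band in counts:
--             if band not in order:
--                 order.append(band)
--     # Phase 3: assemble the per-band records from the tables.
--     return {
--         band: {label: counts.get(band, 0) for label, counts in tallies}
--         for band in order
--     }
-- ===== Notes on version B (the rewrite author's own statement) =====
-- stated objective: alternative
-- what changed: A increments nested counters in one shared table per entry; B is a tally-then-merge two-phase strategy: it first builds one frequency table per direction, then derives the band order from the three tables and assembles each band's zero-defaulted record by reading the three counters.
import Mathlib
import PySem

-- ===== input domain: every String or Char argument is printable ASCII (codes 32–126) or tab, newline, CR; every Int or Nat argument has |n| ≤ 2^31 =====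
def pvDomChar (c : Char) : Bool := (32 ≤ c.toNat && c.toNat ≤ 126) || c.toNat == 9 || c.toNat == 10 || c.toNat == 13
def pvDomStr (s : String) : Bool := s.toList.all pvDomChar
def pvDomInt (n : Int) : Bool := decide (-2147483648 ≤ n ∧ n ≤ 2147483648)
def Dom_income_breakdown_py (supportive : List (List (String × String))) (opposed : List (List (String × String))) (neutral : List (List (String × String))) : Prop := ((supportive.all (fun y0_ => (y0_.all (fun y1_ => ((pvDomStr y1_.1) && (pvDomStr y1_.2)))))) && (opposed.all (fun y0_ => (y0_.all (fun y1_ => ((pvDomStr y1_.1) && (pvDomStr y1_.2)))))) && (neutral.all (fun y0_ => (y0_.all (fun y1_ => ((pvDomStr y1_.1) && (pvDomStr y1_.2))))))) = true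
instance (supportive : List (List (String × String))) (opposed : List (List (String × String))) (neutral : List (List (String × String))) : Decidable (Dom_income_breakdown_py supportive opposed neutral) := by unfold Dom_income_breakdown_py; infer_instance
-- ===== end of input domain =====

-- B replaces A's per-entry incrementing of one shared table by a tally-then-merge decomposition
-- (one frequency table per direction, then band order and per-band records assembled from the
-- three tables); alternative decomposition, same result.

-- ===== PORT A =====
-- entry["income_band"]: first-match lookup; "" stands in where Python raises KeyError (excluded by Pre_)
def pvBand (e : List (String × String)) : String := ((PySem.Dict.mk e).get? "income_band").getD ""

-- the dict literal {"supportive": 0, "opposed": 0, "neutral": 0}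
def pvZero : PySem.Dict String Int := PySem.Dict.ofList [("supportive", 0), ("opposed", 0), ("neutral", 0)]

def income_breakdown_py (supportive : List (List (String × String))) (opposed : List (List (String × String))) (neutral : List (List (String × String))) : List (String × List (String × Int)) :=
  let breakdown : PySem.Dict String (PySem.Dict String Int) :=
    ([(supportive, "supportive"), (opposed, "opposed"), (neutral, "neutral")]).foldl
      (fun bd gl =>
        gl.1.foldl (fun bd entry =>
          -- band = entry["income_band"]; breakdown.setdefault(band, {..0..}); breakdown[band][label] += 1
          (bd.setdefault (pvBand entry) pvZero).modify (pvBand entry) pvZero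
            (fun inner => inner.modify gl.2 0 (· + 1))) bd)
      PySem.Dict.empty
  breakdown.items.map (fun p => (p.1, p.2.items))

-- ===== PORT B =====
def income_breakdown_py_alt (supportive : List (List (String × String))) (opposed : List (List (String × String))) (neutral : List (List (String × String))) : List (String × List (String × Int)) :=
  -- phase 1: one frequency table per direction
  let tallies : List (String × PySem.Dict String Int) :=
    ([("supportive", supportive), ("opposed", opposed), ("neutral", neutral)]).foldl
      (fun ts lg =>
        ts ++ [(lg.1,
          lg.2.foldl (fun c entry => c.insert (pvBand entry) (c.getD (pvBand entry) 0 + 1))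
            PySem.Dict.empty)]) []
  -- phase 2: band order = first appearance across the three tables
  let order : PySem.Set String :=
    tallies.foldl (fun ord t => t.2.keys.foldl (fun ord b => PySem.Set.add ord b) ord) []
  -- phase 3: assemble per-band records from the tables
  order.map (fun b => (b, tallies.map (fun t => (t.1, t.2.getD b 0))))

-- ===== PRECONDITION & SPEC =====
-- Pre_ excludes exactly the inputs on which Python A raises KeyError: an entry without an "income_band" key.
def Pre_income_breakdown_py (supportive : List (List (String × String))) (opposed : List (List (String × String))) (neutral : List (List (String × String))) : Prop :=
  ((supportive ++ opposed ++ neutral).all (fun e => (PySem.Dict.mk e).contains "income_band")) = true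
instance (supportive : List (List (String × String))) (opposed : List (List (String × String))) (neutral : List (List (String × String))) : Decidable (Pre_income_breakdown_py supportive opposed neutral) := by unfold Pre_income_breakdown_py; infer_instance

def pvWitness_income_breakdown_py : (List (List (String × String))) × (List (List (String × String))) × (List (List (String × String))) :=
  ([[("income_band", "low")]], [], [[("income_band", "low"), ("region", "x")], [("income_band", "high")]])

def Spec_income_breakdown_py (supportive : List (List (String × String))) (opposed : List (List (String × String))) (neutral : List (List (String × String))) (out : List (String × List (String × Int))) : Prop := out = income_breakdown_py_alt supportive opposed neutral
instance (supportive : List (List (String × String))) (opposed : List (List (String × String))) (neutral : List (List (String × String))) (out : List (String × List (String × Int))) : Decidable (Spec_income_breakdown_py supportive opposed neutral out) := by unfold Spec_income_breakdown_py; infer_instance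

-- ===== CLAIM (what is proved, stated in full; the proofs are below) =====
def Claim_equal_income_breakdown_py : Prop := ∀ (supportive : List (List (String × String))) (opposed : List (List (String × String))) (neutral : List (List (String × String))), Dom_income_breakdown_py supportive opposed neutral → Pre_income_breakdown_py supportive opposed neutral → Spec_income_breakdown_py supportive opposed neutral (income_breakdown_py supportive opposed neutral)

-- ===== LEMMAS AND PROOFS =====

-- one step of A's inner loop, as a function of the (band, label) pair
def pvStep (l : String) (d : PySem.Dict String (PySem.Dict String Int)) (b : String) : PySem.Dict String (PySem.Dict String Int) :=
  (d.setdefault b pvZero).modify b pvZero (fun inner => inner.modify l 0 (· + 1))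

-- the per-band record after processing the (band, label) pairs ps
def pvInner (ps : List (String × String)) (b : String) : PySem.Dict String Int :=
  PySem.Dict.mk [("supportive", (ps.count (b, "supportive") : Int)),
                 ("opposed", (ps.count (b, "opposed") : Int)),
                 ("neutral", (ps.count (b, "neutral") : Int))]

-- A's whole table after processing the (band, label) pairs ps
def pvModel (ps : List (String × String)) : PySem.Dict String (PySem.Dict String Int) :=
  PySem.Dict.mk ((PySem.Set.ofList (ps.map Prod.fst)).map (fun b => (b, pvInner ps b)))

lemma pvZero_eq : pvZero = PySem.Dict.mk [("supportive", 0), ("opposed", 0), ("neutral", 0)] := by decide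

lemma keys_pvModel (ps : List (String × String)) : (pvModel ps).keys = PySem.Set.ofList (ps.map Prod.fst) := by
  simp only [pvModel, PySem.Dict.keys, List.map_map]
  exact List.map_id _

lemma nodup_keys_pvModel (ps : List (String × String)) : (pvModel ps).keys.Nodup := by
  rw [keys_pvModel]; exact PySem.Set.nodup_ofList _

lemma getD_pvModel (ps : List (String × String)) (k : String) :
    (pvModel ps).getD k pvZero = pvInner ps k := by
  by_cases hk : k ∈ ps.map Prod.fst
  · have hmem : (k, pvInner ps k) ∈ (pvModel ps).items :=
      List.mem_map_of_mem ((PySem.Set.mem_ofList _ _).mpr hk)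
    exact PySem.Dict.getD_of_mem_items _ hmem (nodup_keys_pvModel ps) pvZero
  · have hc : (pvModel ps).contains k = false := by
      rw [PySem.Dict.contains_eq_decide_mem_keys, keys_pvModel]
      simp [PySem.Set.mem_ofList, hk]
    rw [PySem.Dict.getD_of_not_contains _ pvZero hc]
    have h0 : ∀ lab : String, ps.count (k, lab) = 0 := by
      intro lab
      refine List.count_eq_zero.mpr (fun hmem => hk ?_)
      exact List.mem_map_of_mem hmem
    rw [pvZero_eq]; simp [pvInner, h0]

lemma pvInner_append_ne (ps : List (String × String)) (b l k : String) (hk : k ≠ b) :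
    pvInner (ps ++ [(b, l)]) k = pvInner ps k := by
  have h0 : ∀ lab : String, ([((b : String), (l : String))]).count (k, lab) = 0 := by
    intro lab
    refine List.count_eq_zero.mpr ?_
    simp only [List.mem_singleton]
    exact fun hh => hk (congrArg Prod.fst hh)
  simp [pvInner, List.count_append, h0]

lemma pvInner_modify (ps : List (String × String)) (b l : String)
    (hl : l = "supportive" ∨ l = "opposed" ∨ l = "neutral") :
    (pvInner ps b).modify l 0 (· + 1) = pvInner (ps ++ [(b, l)]) b := by
  rcases hl with h | h | h <;> subst h <;>
    (apply PySem.Dict.ext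
     simp [pvInner, PySem.Dict.modify, PySem.Dict.insert, PySem.Dict.getD_eq_get?_getD,
       PySem.Dict.get?_mk_cons])

lemma pvStep_model (ps : List (String × String)) (b l : String)
    (hl : l = "supportive" ∨ l = "opposed" ∨ l = "neutral") :
    pvStep l (pvModel ps) b = pvModel (ps ++ [(b, l)]) := by
  have hcont : ((pvModel ps).setdefault b pvZero).contains b = true := by
    rw [PySem.Dict.contains_setdefault]; simp
  have hK : (pvStep l (pvModel ps) b).keys = PySem.Set.ofList ((ps ++ [(b, l)]).map Prod.fst) := by
    simp only [pvStep, PySem.Dict.modify]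
    rw [PySem.Dict.keys_insert_of_contains _ _ hcont]
    rw [PySem.Dict.keys_setdefault, PySem.Dict.contains_eq_decide_mem_keys, keys_pvModel]
    simp only [List.map_append, List.map_cons, List.map_nil, PySem.Set.ofList_append_singleton,
      PySem.Set.add_eq_ite, PySem.Set.mem_ofList]
    by_cases hb : b ∈ ps.map Prod.fst <;> simp [hb]
  have hnd1 : (pvStep l (pvModel ps) b).keys.Nodup := by
    rw [hK]; exact PySem.Set.nodup_ofList _
  have hgd : ∀ k, (pvStep l (pvModel ps) b).getD k pvZero = pvInner (ps ++ [(b, l)]) k := by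
    intro k
    by_cases hk : k = b
    · subst hk
      simp only [pvStep, PySem.Dict.modify]
      rw [PySem.Dict.getD_insert_self]
      rw [PySem.Dict.getD_setdefault_self, getD_pvModel]
      exact pvInner_modify ps k l hl
    · simp only [pvStep, PySem.Dict.modify]
      rw [PySem.Dict.getD_insert]
      simp only [hk, if_false]
      rw [PySem.Dict.getD_eq_get?_getD, PySem.Dict.get?_setdefault_of_ne _ _ hk,
        ← PySem.Dict.getD_eq_get?_getD, getD_pvModel, pvInner_append_ne ps b l k hk]
  apply PySem.Dict.ext
  rw [PySem.Dict.items_eq_map_keys _ hnd1 pvZero,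
    PySem.Dict.items_eq_map_keys _ (nodup_keys_pvModel _) pvZero, hK, keys_pvModel]
  exact List.map_congr_left fun k _ => by rw [hgd k, getD_pvModel]

lemma foldl_pvStep (ps : List (String × String))
    (hps : ∀ p ∈ ps, p.2 = "supportive" ∨ p.2 = "opposed" ∨ p.2 = "neutral") :
    ps.foldl (fun d p => pvStep p.2 d p.1) PySem.Dict.empty = pvModel ps := by
  induction ps using List.reverseRecOn with
  | nil => decide
  | append_singleton ps p ih =>
    rw [List.foldl_append, List.foldl_cons, List.foldl_nil,
      ih (fun q hq => hps q (List.mem_append_left _ hq))]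
    obtain ⟨b, l⟩ := p
    exact pvStep_model ps b l (hps (b, l) (List.mem_append_right _ (List.mem_singleton_self _)))

-- A's inner loop over a group, re-indexed by its (band, label) pairs
lemma pvGroupFold (lab : String) (g : List (List (String × String))) (d : PySem.Dict String (PySem.Dict String Int)) :
    g.foldl (fun bd entry =>
        (bd.setdefault (pvBand entry) pvZero).modify (pvBand entry) pvZero
          (fun inner => inner.modify lab 0 (· + 1))) d
      = ((g.map pvBand).map (fun a => (a, lab))).foldl (fun d p => pvStep p.2 d p.1) d := by
  rw [List.foldl_map, List.foldl_map]
  rfl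

lemma portA_eq (s o n : List (List (String × String))) :
    income_breakdown_py s o n =
      (pvModel ((s.map pvBand).map (fun a => (a, "supportive")) ++
        ((o.map pvBand).map (fun a => (a, "opposed")) ++
          (n.map pvBand).map (fun a => (a, "neutral"))))).items.map (fun p => (p.1, p.2.items)) := by
  simp only [income_breakdown_py, List.foldl_cons, List.foldl_nil]
  rw [pvGroupFold, pvGroupFold, pvGroupFold, ← List.foldl_append, ← List.foldl_append,
    foldl_pvStep]
  intro p hp
  rcases List.mem_append.mp hp with h | h
  · rcases List.mem_map.mp h with ⟨a, _, rfl⟩; simp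
  · rcases List.mem_append.mp h with h' | h'
    · rcases List.mem_map.mp h' with ⟨a, _, rfl⟩; simp
    · rcases List.mem_map.mp h' with ⟨a, _, rfl⟩; simp

-- each group's hand-built counter is Counter(bands)
lemma counter_group (g : List (List (String × String))) :
    g.foldl (fun c entry => c.insert (pvBand entry) (c.getD (pvBand entry) 0 + 1)) PySem.Dict.empty
      = PySem.Dict.counter (g.map pvBand) := by
  rw [← PySem.Dict.foldl_insert_getD_add_one_eq_counter, List.foldl_map]

lemma update_ofList (s : PySem.Set String) (ys : List String) :
    PySem.Set.update s (PySem.Set.ofList ys) = PySem.Set.update s ys := by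
  rw [PySem.Set.update_eq_append_filter, PySem.Set.update_eq_append_filter, PySem.Set.ofList_ofList]

lemma pvOrderFold (ord : PySem.Set String) (w : List String) :
    (PySem.Dict.counter w).keys.foldl (fun ord b => PySem.Set.add ord b) ord
      = PySem.Set.update ord w := by
  show PySem.Set.update ord (PySem.Dict.counter w).keys = _
  rw [PySem.Dict.keys_counter, update_ofList]

lemma portB_eq (s o n : List (List (String × String))) :
    income_breakdown_py_alt s o n =
      (PySem.Set.ofList ((s.map pvBand ++ o.map pvBand) ++ n.map pvBand)).map (fun b =>
        (b, [("supportive", ((s.map pvBand).count b : Int)),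
             ("opposed", ((o.map pvBand).count b : Int)),
             ("neutral", ((n.map pvBand).count b : Int))])) := by
  simp only [income_breakdown_py_alt, List.foldl_cons, List.foldl_nil, List.nil_append,
    List.cons_append]
  rw [counter_group, counter_group, counter_group]
  rw [pvOrderFold, pvOrderFold, pvOrderFold, PySem.Set.update_nil_left,
    ← PySem.Set.ofList_append, ← PySem.Set.ofList_append]
  simp only [List.map_cons, List.map_nil, PySem.Dict.getD_counter]

lemma count_map_pair (w : List String) (lab b lab' : String) :
    (w.map (fun a => (a, lab))).count (b, lab') = if lab' = lab then w.count b else 0 := by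
  induction w with
  | nil => simp
  | cons a t ih =>
    simp only [List.map_cons, List.count_cons, ih]
    by_cases hl : lab' = lab
    · subst hl
      by_cases hab : a = b
      · subst hab; simp
      · have h1 : (((a, lab') : String × String) == (b, lab')) = false := by
          rw [beq_eq_false_iff_ne]; exact fun hh => hab (congrArg Prod.fst hh)
        have h2 : (a == b) = false := by rw [beq_eq_false_iff_ne]; exact hab
        simp [h1, h2]
    · have h1 : (((a, lab) : String × String) == (b, lab')) = false := by
        rw [beq_eq_false_iff_ne]; exact fun hh => hl (congrArg Prod.snd hh).symm
      simp [h1, hl]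

lemma map_fst_pair (w : List String) (lab : String) :
    (w.map (fun a => (a, lab))).map Prod.fst = w := by
  rw [List.map_map]
  exact (List.map_congr_left fun a _ => rfl).trans (List.map_id w)

lemma items_pvModel (ps : List (String × String)) :
    (pvModel ps).items = (PySem.Set.ofList (ps.map Prod.fst)).map (fun b => (b, pvInner ps b)) := rfl

-- ===== VERDICT (by name: the statement is the Claim_ definition above) =====
theorem income_breakdown_py_spec : Claim_equal_income_breakdown_py := by
  intro s o n _ _
  show income_breakdown_py s o n = income_breakdown_py_alt s o n
  rw [portA_eq, portB_eq, items_pvModel, List.map_map]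
  have hidx : ((s.map pvBand).map (fun a => (a, "supportive")) ++
       ((o.map pvBand).map (fun a => (a, "opposed")) ++
        (n.map pvBand).map (fun a => (a, "neutral")))).map Prod.fst
      = (s.map pvBand ++ o.map pvBand) ++ n.map pvBand := by
    rw [List.map_append, List.map_append, map_fst_pair, map_fst_pair, map_fst_pair,
      ← List.append_assoc]
  rw [hidx]
  refine List.map_congr_left fun b _ => ?_
  have hs : ((s.map pvBand).map (fun a => (a, "supportive")) ++
       ((o.map pvBand).map (fun a => (a, "opposed")) ++
        (n.map pvBand).map (fun a => (a, "neutral")))).count (b, "supportive") = (s.map pvBand).count b := by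
    rw [List.count_append, List.count_append, count_map_pair, count_map_pair, count_map_pair]
    simp
  have ho : ((s.map pvBand).map (fun a => (a, "supportive")) ++
       ((o.map pvBand).map (fun a => (a, "opposed")) ++
        (n.map pvBand).map (fun a => (a, "neutral")))).count (b, "opposed") = (o.map pvBand).count b := by
    rw [List.count_append, List.count_append, count_map_pair, count_map_pair, count_map_pair]
    simp
  have hn : ((s.map pvBand).map (fun a => (a, "supportive")) ++
       ((o.map pvBand).map (fun a => (a, "opposed")) ++
        (n.map pvBand).map (fun a => (a, "neutral")))).count (b, "neutral") = (n.map pvBand).count b := by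
    rw [List.count_append, List.count_append, count_map_pair, count_map_pair, count_map_pair]
    simp
  show (b, [("supportive", (((s.map pvBand).map (fun a => (a, "supportive")) ++
       ((o.map pvBand).map (fun a => (a, "opposed")) ++
        (n.map pvBand).map (fun a => (a, "neutral")))).count (b, "supportive") : Int)),
            ("opposed", (((s.map pvBand).map (fun a => (a, "supportive")) ++
       ((o.map pvBand).map (fun a => (a, "opposed")) ++
        (n.map pvBand).map (fun a => (a, "neutral")))).count (b, "opposed") : Int)),
            ("neutral", (((s.map pvBand).map (fun a => (a, "supportive")) ++
       ((o.map pvBand).map (fun a => (a, "opposed")) ++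
        (n.map pvBand).map (fun a => (a, "neutral")))).count (b, "neutral") : Int))])
      = (b, [("supportive", ((s.map pvBand).count b : Int)),
             ("opposed", ((o.map pvBand).count b : Int)),
             ("neutral", ((n.map pvBand).count b : Int))])
  rw [hs, ho, hn]
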